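-- pv_equiv track=rewrite | github.com/StructuralNeurobiologyLab/SyConn | syconn/handler/basics.py | group_ids_to_so_storage
-- ===== SOURCE A (Python) =====
-- from collections import defaultdict
--
-- def group_ids_to_so_storage(ids, params, significant_digits=5):
--     id_dict = defaultdict(list)
--     param_dicts = [defaultdict(list) for _ in range(len(params))]
--     for i_id in range(len(ids)):
--         this_id = ids[i_id]
--         this_id_str = "%.5d" % this_id
--         id_dict[this_id_str[-significant_digits:]].append(this_id)
--         for i_param in range(len(params)):
--             param_dicts[i_param][this_id_str[-significant_digits:]].\
--                 append(params[i_param][i_id])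
--
--     return [id_dict] + param_dicts
-- ===== SOURCE B (Python) =====
-- from collections import defaultdict
--
--
-- def group_ids_to_so_storage(ids, params, significant_digits=5):
--     # Index-table-then-gather: one pass computes each id's suffix key and
--     # records its position; then each output dict is built key-by-key.
--     keys = [("%.5d" % v)[-significant_digits:] for v in ids]
--     index = {}
--     for i, k in enumerate(keys):
--         index.setdefault(k, []).append(i)
--
--     def gather(xs):
--         d = defaultdict(list)
--         for k, pos in index.items():
--             d[k] = [xs[i] for i in pos]
--         return d
--
--     return [gather(ids)] + [gather(row) for row in params]
-- ===== Notes on version B (the rewrite author's own statement) =====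
-- stated objective: alternative
-- what changed: A appends to every dict inside one interleaved scan (for each id, touch id_dict and each param_dict); B first builds a single index mapping each suffix key to its ordered positions, then constructs id_dict and every param_dict by gathering values at those positions, so the dicts are written key-by-key instead of id-by-id.
import Mathlib
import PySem

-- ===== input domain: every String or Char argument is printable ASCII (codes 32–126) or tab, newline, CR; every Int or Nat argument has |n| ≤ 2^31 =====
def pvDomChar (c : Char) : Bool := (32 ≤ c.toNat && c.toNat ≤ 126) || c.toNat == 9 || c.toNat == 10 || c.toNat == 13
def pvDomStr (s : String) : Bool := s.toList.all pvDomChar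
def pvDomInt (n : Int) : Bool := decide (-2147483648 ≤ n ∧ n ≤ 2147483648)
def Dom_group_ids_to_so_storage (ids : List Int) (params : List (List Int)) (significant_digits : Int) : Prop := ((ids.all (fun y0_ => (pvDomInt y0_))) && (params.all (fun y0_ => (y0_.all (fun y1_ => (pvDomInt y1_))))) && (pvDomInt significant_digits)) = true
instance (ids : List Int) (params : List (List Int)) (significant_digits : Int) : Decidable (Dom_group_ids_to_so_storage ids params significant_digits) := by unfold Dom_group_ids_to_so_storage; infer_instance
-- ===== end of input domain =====

-- B replaces A's interleaved append-as-you-scan with an index-table-then-gather decomposition (alternative; same return value).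


-- ===== PORT A =====
-- '"%.5d" % n': precision-5 decimal — at least 5 digits, zero-padded, sign in front of the padding.
-- Exact via zfill: width 5, or 6 for a negative n (one slot for the '-').
def pyFmtD5 (n : Int) : String :=
  PySem.Str.zfill (PySem.Int.toStr n) (if n < 0 then 6 else 5)

-- the key expression ("%.5d" % n)[-significant_digits:] both Pythons use, verbatim
def soKey (n : Int) (significant_digits : Int) : String :=
  PySem.Str.slice (pyFmtD5 n) (some (-significant_digits)) none

def group_ids_to_so_storage (ids : List Int) (params : List (List Int)) (significant_digits : Int) : List (List (String × List Int)) :=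
  let init : PySem.Dict String (List Int) × List (PySem.Dict String (List Int)) :=
    (PySem.Dict.empty, params.map (fun _ => PySem.Dict.empty))
  let st := (PySem.List.pyRange 0 (ids.length : Int) 1).foldl (fun st i =>
      let this_id := PySem.List.pyGetD ids i 0
      let idd := st.1.modify (soKey this_id significant_digits) [] (· ++ [this_id])
      let pds := (PySem.List.pyRange 0 (params.length : Int) 1).foldl (fun ds ip =>
          ds.set ip.toNat ((PySem.List.pyGetD ds ip PySem.Dict.empty).modify
            (soKey this_id significant_digits) []
            (· ++ [PySem.List.pyGetD (PySem.List.pyGetD params ip []) i 0]))) st.2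
      (idd, pds)) init
  (st.1 :: st.2).map PySem.Dict.items

-- ===== PORT B =====
def group_ids_to_so_storage_alt (ids : List Int) (params : List (List Int)) (significant_digits : Int) : List (List (String × List Int)) :=
  let keys := ids.map (fun v => soKey v significant_digits)
  let index := (PySem.List.enumerate keys 0).foldl
      (fun d p => d.modify p.2 [] (· ++ [p.1]))
      (PySem.Dict.empty : PySem.Dict String (List Int))
  let gather := fun (xs : List Int) =>
      index.items.foldl
        (fun d p => d.insert p.1 (p.2.map (fun i => PySem.List.pyGetD xs i 0)))
        (PySem.Dict.empty : PySem.Dict String (List Int))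
  (gather ids :: params.map gather).map PySem.Dict.items

-- ===== PRECONDITION & SPEC =====
-- Pre_ excludes exactly the inputs where A raises IndexError: a params row shorter than ids.
def Pre_group_ids_to_so_storage (ids : List Int) (params : List (List Int)) (significant_digits : Int) : Prop :=
  ∀ row ∈ params, ids.length ≤ row.length
instance (ids : List Int) (params : List (List Int)) (significant_digits : Int) : Decidable (Pre_group_ids_to_so_storage ids params significant_digits) := by unfold Pre_group_ids_to_so_storage; infer_instance

def pvWitness_group_ids_to_so_storage : List Int × List (List Int) × Int := ([1, 100001, -3], [[7, 8, 9]], 5)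

def Spec_group_ids_to_so_storage (ids : List Int) (params : List (List Int)) (significant_digits : Int) (out : List (List (String × List Int))) : Prop := out = group_ids_to_so_storage_alt ids params significant_digits
instance (ids : List Int) (params : List (List Int)) (significant_digits : Int) (out : List (List (String × List Int))) : Decidable (Spec_group_ids_to_so_storage ids params significant_digits out) := by unfold Spec_group_ids_to_so_storage; infer_instance

-- ===== CLAIM (what is proved, stated in full; the proofs are below) =====
def Claim_equal_group_ids_to_so_storage : Prop := ∀ (ids : List Int) (params : List (List Int)) (significant_digits : Int), Dom_group_ids_to_so_storage ids params significant_digits → Pre_group_ids_to_so_storage ids params significant_digits → Spec_group_ids_to_so_storage ids params significant_digits (group_ids_to_so_storage ids params significant_digits)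

-- ===== LEMMAS AND PROOFS =====

-- a fold whose two components do not interact splits
theorem pv_foldl_prod_split {α β γ : Type} (L : List γ) (f : α → γ → α) (g : β → γ → β) (a : α) (b : β) :
    L.foldl (fun p x => (f p.1 x, g p.2 x)) (a, b) = (L.foldl f a, L.foldl g b) := by
  induction L generalizing a b with
  | nil => rfl
  | cons x L ih => simpa using ih (f a x) (g b x)

-- a range-indexed in-place update loop is a mapIdx
theorem pv_foldl_pyRange_set {α : Type} (g : Int → α → α) (dflt : α) :
    ∀ (ds pre : List α),
      (PySem.List.pyRange (pre.length : Int) ((pre.length : Int) + ds.length) 1).foldl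
        (fun st ip => st.set ip.toNat (g ip (PySem.List.pyGetD st ip dflt))) (pre ++ ds)
      = pre ++ ds.mapIdx (fun j d => g ((pre.length : Int) + j) d) := by
  intro ds
  induction ds with
  | nil => intro pre; simp [PySem.List.pyRange_one_eq_nil]
  | cons d ds ih =>
    intro pre
    have hlt : (pre.length : Int) < (pre.length : Int) + (d :: ds).length := by
      simp only [List.length_cons]
      push_cast
      omega
    rw [PySem.List.pyRange_one_cons hlt, List.foldl_cons]
    have hget : PySem.List.pyGetD (pre ++ d :: ds) (pre.length : Int) dflt = d := by
      rw [PySem.List.pyGetD_natCast]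
      simp [List.getD_eq_getElem?_getD]
    have hset : (pre ++ d :: ds).set ((pre.length : Int)).toNat (g (pre.length : Int) d)
        = pre ++ [g (pre.length : Int) d] ++ ds := by
      rw [Int.toNat_natCast]
      rw [List.set_append_right _ _ (le_refl _)]
      simp
    rw [hget, hset]
    have h2 := ih (pre ++ [g (pre.length : Int) d])
    have hlen : ((pre ++ [g (pre.length : Int) d]).length : Int) = (pre.length : Int) + 1 := by
      simp
    rw [hlen] at h2
    have hrange : (pre.length : Int) + ((d :: ds).length : Int) = ((pre.length : Int) + 1) + (ds.length : Int) := by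
      simp only [List.length_cons]
      push_cast
      omega
    rw [hrange, h2]
    simp only [List.append_assoc, List.singleton_append, List.mapIdx_cons]
    congr 2
    congr 1
    funext j d
    congr 1
    push_cast
    ring

theorem pv_foldl_pyRange_set_zero {α : Type} (g : Int → α → α) (dflt : α) (ds : List α) :
    (PySem.List.pyRange 0 (ds.length : Int) 1).foldl
      (fun st ip => st.set ip.toNat (g ip (PySem.List.pyGetD st ip dflt))) ds
    = ds.mapIdx (fun j d => g (j : Int) d) := by
  have h := pv_foldl_pyRange_set g dflt ds []
  simpa using h

-- interleaved per-slot updates commute into per-slot folds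
theorem pv_outer_fission {α : Type} (m : Nat) (gg : Int → Int → α → α) (dflt : α) :
    ∀ (L : List Int) (ds : List α), ds.length = m →
      L.foldl (fun ds i =>
          (PySem.List.pyRange 0 (m : Int) 1).foldl
            (fun st ip => st.set ip.toNat (gg i ip (PySem.List.pyGetD st ip dflt))) ds) ds
      = ds.mapIdx (fun j d => L.foldl (fun d i => gg i (j : Int) d) d) := by
  intro L
  induction L with
  | nil =>
    intro ds h
    have hid : ∀ (l : List α), List.mapIdx (fun _ d => d) l = l := by
      intro l
      induction l with
      | nil => simp
      | cons a t iht => simpa [List.mapIdx_cons] using iht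
    exact (hid ds).symm
  | cons x L ih =>
    intro ds h
    rw [List.foldl_cons]
    have hstep : (PySem.List.pyRange 0 (m : Int) 1).foldl
        (fun st ip => st.set ip.toNat (gg x ip (PySem.List.pyGetD st ip dflt))) ds
        = ds.mapIdx (fun j d => gg x (j : Int) d) := by
      rw [← h]
      exact pv_foldl_pyRange_set_zero (gg x) dflt ds
    rw [hstep]
    rw [ih _ (by simpa using h)]
    rw [List.mapIdx_mapIdx]
    congr 1

-- canonical items of A's grouping fold
theorem pv_group_items (K : Int → String) (f : Int → Int) (L : List Int) :
    ((L.foldl (fun d i => d.modify (K i) [] (· ++ [f i])) PySem.Dict.empty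
        : PySem.Dict String (List Int))).items
    = (PySem.Set.ofList (L.map K)).map (fun k => (k, (L.filter (fun i => K i == k)).map f)) := by
  have hnd : ((L.foldl (fun d i => d.modify (K i) [] (· ++ [f i])) PySem.Dict.empty
      : PySem.Dict String (List Int))).keys.Nodup :=
    PySem.Dict.nodup_keys_foldl_modify_key L K [] (fun _ i => fun x => x ++ [f i]) _
      PySem.Dict.nodup_keys_empty
  rw [PySem.Dict.items_eq_map_keys _ hnd []]
  rw [PySem.Dict.keys_foldl_modify_key L K [] (fun _ i => fun x => x ++ [f i])]
  have hupd : PySem.Set.update (PySem.Dict.empty : PySem.Dict String (List Int)).keys (L.map K)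
      = PySem.Set.ofList (L.map K) := rfl
  rw [hupd]
  apply List.map_congr_left
  intro k hk
  have hfold : (L.foldl (fun d i => d.modify (K i) [] (· ++ [f i])) PySem.Dict.empty
      : PySem.Dict String (List Int))
      = (L.map (fun i => (K i, f i))).foldl (fun d p => d.modify p.1 [] (· ++ [p.2]))
        PySem.Dict.empty := by
    rw [List.foldl_map]
  rw [hfold, PySem.Dict.getD_foldl_modify_append]
  simp [List.filter_map, Function.comp_def]

-- gathering from an index with Nodup keys is a map over its items
theorem pv_gather_items (index : PySem.Dict String (List Int)) (hnd : index.keys.Nodup)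
    (f : Int → Int) :
    ((index.items.foldl (fun d p => d.insert p.1 (p.2.map f)) PySem.Dict.empty
        : PySem.Dict String (List Int))).items
    = index.items.map (fun p => (p.1, p.2.map f)) := by
  have h := PySem.Dict.items_foldl_insert_fresh index.items (fun p => p.1)
      (fun p => p.2.map f) (PySem.Dict.empty : PySem.Dict String (List Int))
      (fun a _ => by simp [PySem.Dict.contains_empty]) (by simpa [PySem.Dict.keys] using hnd)
  simpa [PySem.Dict.empty] using h

-- B's index fold over enumerate equals the canonical fold over the position range
theorem pv_index_eq (ids : List Int) (sd : Int) :
    ((PySem.List.enumerate (ids.map (fun v => soKey v sd)) 0).foldl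
        (fun d p => d.modify p.2 [] (· ++ [p.1]))
        (PySem.Dict.empty : PySem.Dict String (List Int)))
    = (PySem.List.pyRange 0 (ids.length : Int) 1).foldl
        (fun d i => d.modify (soKey (PySem.List.pyGetD ids i 0) sd) [] (· ++ [i]))
        PySem.Dict.empty := by
  rw [PySem.List.enumerate_eq_map_pyRange (ids.map (fun v => soKey v sd)) ""]
  rw [List.foldl_map]
  have hlen : PySem.List.len (ids.map (fun v => soKey v sd)) = (ids.length : Int) := by
    simp [PySem.List.len]
  rw [hlen]
  apply PySem.List.foldl_congr_mem
  intro acc j hj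
  rcases PySem.List.mem_pyRange_one.mp hj with ⟨h0, h1⟩
  rw [PySem.List.pyGetD_eq_getElem _ _ h0 (by simpa using h1),
      PySem.List.pyGetD_eq_getElem _ _ h0 h1]
  simp

-- the central equality: A's append-as-you-scan dict = B's gather from the index, for any value row
theorem pv_dict_eq (ids : List Int) (sd : Int) (xs : List Int) :
    ((PySem.List.pyRange 0 (ids.length : Int) 1).foldl
        (fun d i => d.modify (soKey (PySem.List.pyGetD ids i 0) sd) []
          (· ++ [PySem.List.pyGetD xs i 0]))
        (PySem.Dict.empty : PySem.Dict String (List Int))).items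
    = (((PySem.List.enumerate (ids.map (fun v => soKey v sd)) 0).foldl
          (fun d p => d.modify p.2 [] (· ++ [p.1]))
          (PySem.Dict.empty : PySem.Dict String (List Int))).items.foldl
        (fun d p => d.insert p.1 (p.2.map (fun i => PySem.List.pyGetD xs i 0)))
        (PySem.Dict.empty : PySem.Dict String (List Int))).items := by
  rw [pv_index_eq]
  have hnd : ((PySem.List.pyRange 0 (ids.length : Int) 1).foldl
      (fun d i => d.modify (soKey (PySem.List.pyGetD ids i 0) sd) [] (· ++ [i]))
      (PySem.Dict.empty : PySem.Dict String (List Int))).keys.Nodup :=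
    PySem.Dict.nodup_keys_foldl_modify_key _ _ [] (fun _ i => fun x => x ++ [i]) _
      PySem.Dict.nodup_keys_empty
  rw [pv_gather_items _ hnd]
  rw [pv_group_items (fun i => soKey (PySem.List.pyGetD ids i 0) sd) (fun i => i)]
  rw [pv_group_items (fun i => soKey (PySem.List.pyGetD ids i 0) sd)
      (fun i => PySem.List.pyGetD xs i 0)]
  simp [List.map_map, Function.comp_def]

-- the two ports agree everywhere (the Pre_/Dom_ hypotheses are not even needed for the ports' values)
theorem pv_main (ids : List Int) (params : List (List Int)) (sd : Int) :
    group_ids_to_so_storage ids params sd = group_ids_to_so_storage_alt ids params sd := by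
  simp only [group_ids_to_so_storage, group_ids_to_so_storage_alt]
  rw [pv_foldl_prod_split (PySem.List.pyRange 0 (ids.length : Int) 1)
      (fun (d : PySem.Dict String (List Int)) i =>
        d.modify (soKey (PySem.List.pyGetD ids i 0) sd) [] (· ++ [PySem.List.pyGetD ids i 0]))
      (fun (ds : List (PySem.Dict String (List Int))) i =>
        (PySem.List.pyRange 0 (params.length : Int) 1).foldl
          (fun st ip => st.set ip.toNat ((PySem.List.pyGetD st ip PySem.Dict.empty).modify
            (soKey (PySem.List.pyGetD ids i 0) sd) []
            (· ++ [PySem.List.pyGetD (PySem.List.pyGetD params ip []) i 0]))) ds)]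
  simp only [List.map_cons]
  congr 1
  · exact pv_dict_eq ids sd ids
  · have hfis := pv_outer_fission params.length
        (fun i ip d => d.modify (soKey (PySem.List.pyGetD ids i 0) sd) []
          (· ++ [PySem.List.pyGetD (PySem.List.pyGetD params ip []) i 0]))
        PySem.Dict.empty (PySem.List.pyRange 0 (ids.length : Int) 1)
        (params.map (fun _ => PySem.Dict.empty)) (by simp)
    rw [hfis]
    apply List.ext_getElem
    · simp
    · intro j h1 h2
      simp only [List.getElem_map, List.getElem_mapIdx]
      have hj : j < params.length := by simpa using h1
      have hrow : PySem.List.pyGetD params (j : Int) [] = params[j] := by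
        rw [PySem.List.pyGetD_eq_getElem _ _ (by omega) (by exact_mod_cast hj)]
        simp
      rw [hrow]
      exact pv_dict_eq ids sd params[j]

-- ===== VERDICT (by name: the statement is the Claim_ definition above) =====
theorem group_ids_to_so_storage_spec : Claim_equal_group_ids_to_so_storage := by
  intro ids params sd _ _
  unfold Spec_group_ids_to_so_storage
  exact pv_main ids params sd
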